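-- pv_equiv track=rewrite | github.com/Steigs89/shuspot | book-admin/example_scripts.py | classify_reading_level
-- ===== SOURCE A (Python) =====
-- def classify_reading_level(book_data):
--     """Classify reading level based on available information"""
--
--     title = book_data.get('title', '').lower()
--     description = book_data.get('description', '').lower()
--     genre = book_data.get('genre', '').lower()
--
--     # Early readers indicators
--     early_indicators = ['first', 'beginning', 'easy', 'simple', 'picture book']
--     if any(indicator in title or indicator in description for indicator in early_indicators):
--         return 'Pre-K to Grade 2'
--
--     # Elementary indicators
--     elementary_indicators = ['elementary', 'chapter book', 'young reader']
--     if any(indicator in title or indicator in description for indicator in elementary_indicators):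
--         return 'Grade 3-5'
--
--     # Middle grade indicators
--     middle_indicators = ['middle grade', 'tween', 'ages 8-12', 'ages 9-13']
--     if any(indicator in description for indicator in middle_indicators):
--         return 'Grade 6-8'
--
--     # Young adult indicators
--     ya_indicators = ['young adult', 'teen', 'ages 13+', 'high school']
--     if any(indicator in description for indicator in ya_indicators):
--         return 'Grade 9-12'
--
--     # Genre-based classification
--     if 'picture' in genre or 'early' in genre:
--         return 'Pre-K to Grade 2'
--     elif 'middle' in genre:
--         return 'Grade 6-8'
--     elif 'young adult' in genre or 'teen' in genre:
--         return 'Grade 9-12'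
--
--     # Default classification
--     return 'Grade 3-5'
-- ===== SOURCE B (Python) =====
-- def classify_reading_level(book_data):
--     """Classify reading level based on available information"""
--     title = book_data.get('title', '').lower()
--     description = book_data.get('description', '').lower()
--     genre = book_data.get('genre', '').lower()
--
--     levels = ['Pre-K to Grade 2', 'Grade 3-5', 'Grade 6-8', 'Grade 9-12',
--               'Pre-K to Grade 2', 'Grade 6-8', 'Grade 9-12', 'Grade 3-5']
--
--     # flat probe list: (priority, keyword, field text)
--     checks = []
--     for kw in ('first', 'beginning', 'easy', 'simple', 'picture book'):
--         checks += [(0, kw, title), (0, kw, description)]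
--     for kw in ('elementary', 'chapter book', 'young reader'):
--         checks += [(1, kw, title), (1, kw, description)]
--     for kw in ('middle grade', 'tween', 'ages 8-12', 'ages 9-13'):
--         checks.append((2, kw, description))
--     for kw in ('young adult', 'teen', 'ages 13+', 'high school'):
--         checks.append((3, kw, description))
--     for p, kw in ((4, 'picture'), (4, 'early'), (5, 'middle'), (6, 'young adult'), (6, 'teen')):
--         checks.append((p, kw, genre))
--
--     best = min((p for p, kw, f in checks if kw in f), default=7)
--     return levels[best]
-- ===== Notes on version B (the rewrite author's own statement) =====
-- stated objective: alternative
-- what changed: A's sequential early-return if/any cascade is replaced by a different algorithm: B builds one flat list of (priority, keyword, field) probes, takes the minimum priority over all matching probes (default 7), and indexes a level table with it.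
import Mathlib
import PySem

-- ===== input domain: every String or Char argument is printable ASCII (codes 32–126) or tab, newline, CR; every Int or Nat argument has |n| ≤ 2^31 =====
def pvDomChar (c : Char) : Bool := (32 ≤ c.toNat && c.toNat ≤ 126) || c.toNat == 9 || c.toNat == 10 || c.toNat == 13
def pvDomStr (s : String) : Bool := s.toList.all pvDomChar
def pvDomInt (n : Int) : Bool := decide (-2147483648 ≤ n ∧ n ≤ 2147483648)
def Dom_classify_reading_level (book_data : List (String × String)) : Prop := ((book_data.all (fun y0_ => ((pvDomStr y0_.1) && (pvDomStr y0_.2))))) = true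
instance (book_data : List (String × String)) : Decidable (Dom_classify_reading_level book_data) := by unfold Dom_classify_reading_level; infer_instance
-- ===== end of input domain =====

-- B replaces A's sequential early-return if/any cascade by a different algorithm: it builds a flat
-- list of (priority, keyword, field) probes, takes the MINIMUM priority over all matches (default 7),
-- and indexes a level table (objective: alternative); same return value on every input.

-- ===== PORT A =====
-- literal transliteration of A's if/any cascade
def classify_reading_level (book_data : List (String × String)) : String :=
  let d := PySem.Dict.mk book_data
  let title := PySem.Str.lower (PySem.Dict.getD d "title" "")
  let description := PySem.Str.lower (PySem.Dict.getD d "description" "")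
  let genre := PySem.Str.lower (PySem.Dict.getD d "genre" "")
  let early_indicators := ["first", "beginning", "easy", "simple", "picture book"]
  if early_indicators.any (fun ind => PySem.Str.isIn ind title || PySem.Str.isIn ind description) then
    "Pre-K to Grade 2"
  else
    let elementary_indicators := ["elementary", "chapter book", "young reader"]
    if elementary_indicators.any (fun ind => PySem.Str.isIn ind title || PySem.Str.isIn ind description) then
      "Grade 3-5"
    else
      let middle_indicators := ["middle grade", "tween", "ages 8-12", "ages 9-13"]
      if middle_indicators.any (fun ind => PySem.Str.isIn ind description) then
        "Grade 6-8"
      else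
        let ya_indicators := ["young adult", "teen", "ages 13+", "high school"]
        if ya_indicators.any (fun ind => PySem.Str.isIn ind description) then
          "Grade 9-12"
        else if PySem.Str.isIn "picture" genre || PySem.Str.isIn "early" genre then
          "Pre-K to Grade 2"
        else if PySem.Str.isIn "middle" genre then
          "Grade 6-8"
        else if PySem.Str.isIn "young adult" genre || PySem.Str.isIn "teen" genre then
          "Grade 9-12"
        else
          "Grade 3-5"

-- ===== PORT B =====
-- the flat probe list built by Source B's five `for` loops
def crlChecks (title description genre : String) : List (Nat × String × String) :=
  (["first", "beginning", "easy", "simple", "picture book"].flatMap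
     (fun kw => [(0, kw, title), (0, kw, description)]))
  ++ (["elementary", "chapter book", "young reader"].flatMap
     (fun kw => [(1, kw, title), (1, kw, description)]))
  ++ (["middle grade", "tween", "ages 8-12", "ages 9-13"].map (fun kw => (2, kw, description)))
  ++ (["young adult", "teen", "ages 13+", "high school"].map (fun kw => (3, kw, description)))
  ++ ([((4 : Nat), "picture"), (4, "early"), (5, "middle"), (6, "young adult"), (6, "teen")].map
     (fun pk => (pk.1, pk.2, genre)))

def classify_reading_level_alt (book_data : List (String × String)) : String :=
  let d := PySem.Dict.mk book_data
  let title := PySem.Str.lower (PySem.Dict.getD d "title" "")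
  let description := PySem.Str.lower (PySem.Dict.getD d "description" "")
  let genre := PySem.Str.lower (PySem.Dict.getD d "genre" "")
  let levels := ["Pre-K to Grade 2", "Grade 3-5", "Grade 6-8", "Grade 9-12",
                 "Pre-K to Grade 2", "Grade 6-8", "Grade 9-12", "Grade 3-5"]
  -- min(p for p, kw, f in checks if kw in f) with default 7, as a fold
  let best := ((crlChecks title description genre).filterMap
      (fun t => if PySem.Str.isIn t.2.1 t.2.2 then some t.1 else none)).foldl Nat.min 7
  -- levels[best]: best ≤ 7 always, so this in-range indexing is exact Python semantics
  levels.getD best ""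

-- ===== PRECONDITION & SPEC =====
def Spec_classify_reading_level (book_data : List (String × String)) (out : String) : Prop := out = classify_reading_level_alt book_data
instance (book_data : List (String × String)) (out : String) : Decidable (Spec_classify_reading_level book_data out) := by unfold Spec_classify_reading_level; infer_instance

-- ===== CLAIM (what is proved, stated in full; the proofs are below) =====
def Claim_equal_classify_reading_level : Prop := ∀ (book_data : List (String × String)), Dom_classify_reading_level book_data → Spec_classify_reading_level book_data (classify_reading_level book_data)

-- ===== LEMMAS AND PROOFS =====

def crlPick : Nat × String × String → Option Nat :=
  fun t => if PySem.Str.isIn t.2.1 t.2.2 then some t.1 else none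

-- one probe consumed by the filtered min-fold
theorem crl_step (a : Nat) (x : Nat × String × String) (rest : List (Nat × String × String)) :
    ((x :: rest).filterMap crlPick).foldl Nat.min a
      = (rest.filterMap crlPick).foldl Nat.min
          (if PySem.Str.isIn x.2.1 x.2.2 then Nat.min a x.1 else a) := by
  by_cases h : PySem.Chars.isIn x.2.1.toList x.2.2.toList <;> simp [crlPick, h]

-- fold over a two-field group of constant priority = one `any` test
theorem crl_gpair (p a : Nat) (t d : String) (kws : List String) :
    ((kws.flatMap (fun kw => [(p, kw, t), (p, kw, d)])).filterMap crlPick).foldl Nat.min a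
      = if kws.any (fun kw => PySem.Str.isIn kw t || PySem.Str.isIn kw d) then Nat.min a p else a := by
  induction kws generalizing a with
  | nil => simp
  | cons kw rest ih =>
    rw [List.flatMap_cons, List.cons_append, List.cons_append, List.nil_append,
      crl_step, crl_step, ih]
    by_cases h1 : PySem.Chars.isIn kw.toList t.toList <;>
      by_cases h2 : PySem.Chars.isIn kw.toList d.toList <;>
      simp [h1, h2]

-- fold over a one-field group of constant priority = one `any` test
theorem crl_gsingle (p a : Nat) (d : String) (kws : List String) :
    ((kws.map (fun kw => (p, kw, d))).filterMap crlPick).foldl Nat.min a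
      = if kws.any (fun kw => PySem.Str.isIn kw d) then Nat.min a p else a := by
  induction kws generalizing a with
  | nil => simp
  | cons kw rest ih =>
    rw [List.map_cons, crl_step, ih]
    by_cases h1 : PySem.Chars.isIn kw.toList d.toList <;>
      simp [h1]

-- the whole comparison, abstracted to the nine boolean tests both programs make
theorem crl_final (c0 c1 c2 c3 g1 g2 g3 g4 g5 : Bool) :
    (if c0 then "Pre-K to Grade 2"
     else if c1 then "Grade 3-5"
     else if c2 then "Grade 6-8"
     else if c3 then "Grade 9-12"
     else if g1 || g2 then "Pre-K to Grade 2"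
     else if g3 then "Grade 6-8"
     else if g4 || g5 then "Grade 9-12"
     else "Grade 3-5")
    = (["Pre-K to Grade 2", "Grade 3-5", "Grade 6-8", "Grade 9-12",
        "Pre-K to Grade 2", "Grade 6-8", "Grade 9-12", "Grade 3-5"] : List String).getD
        (let a0 := if c0 then Nat.min 7 0 else 7
         let a1 := if c1 then Nat.min a0 1 else a0
         let a2 := if c2 then Nat.min a1 2 else a1
         let a3 := if c3 then Nat.min a2 3 else a2
         let a4 := if g1 then Nat.min a3 4 else a3
         let a5 := if g2 then Nat.min a4 4 else a4
         let a6 := if g3 then Nat.min a5 5 else a5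
         let a7 := if g4 then Nat.min a6 6 else a6
         if g5 then Nat.min a7 6 else a7) "" := by
  revert c0 c1 c2 c3 g1 g2 g3 g4 g5
  decide

-- ===== VERDICT (by name: the statement is the Claim_ definition above) =====
theorem classify_reading_level_spec : Claim_equal_classify_reading_level := by
  intro book_data _
  unfold Spec_classify_reading_level classify_reading_level classify_reading_level_alt crlChecks
  show _ = _
  simp only [List.filterMap_append, List.foldl_append]
  rw [show (fun (t : Nat × String × String) => if PySem.Str.isIn t.2.1 t.2.2 then some t.1 else none) = crlPick from rfl]
  rw [crl_gpair, crl_gpair, crl_gsingle, crl_gsingle]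
  simp only [List.map_cons, List.map_nil]
  rw [crl_step, crl_step, crl_step, crl_step, crl_step]
  simp only [List.filterMap_nil, List.foldl_nil]
  exact crl_final _ _ _ _ _ _ _ _ _
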